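-- pv_equiv track=rewrite | github.com/kernelmans/my-ai-codes | pidex.py | pi_x
-- ===== SOURCE A (Python) =====
-- def est_premier(n):
--     """Détermine si un nombre n est premier."""
--     if n < 2:  # Les nombres < 2 ne sont pas premiers
--         return False
--     for i in range(2, int(n**0.5) + 1):  # Vérifie la divisibilité jusqu'à racine(n)
--         if n % i == 0:
--             return False
--     return True
--
-- def pi_x(x):
--     """Calcule la fonction de comptage des nombres premiers π(x)."""
--     compteur = 0
--     pi_values = []  # Liste pour stocker les valeurs de π(x)
--     for i in range(1, x + 1):  # Parcourt les nombres de 1 à x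
--         if est_premier(i):  # Vérifie si le nombre est premier
--             compteur += 1   # Incrémente le compteur si i est premier
--         pi_values.append(compteur)  # Ajoute la valeur actuelle de π(x)
--     return pi_values
-- ===== SOURCE B (Python) =====
-- def pi_x(x):
--     """Sieve of Eratosthenes + running prefix count instead of per-number trial division."""
--     n = max(x, 0)
--     sieve = [True] * (n + 1)
--     for i in range(2, n + 1):
--         for j in range(2 * i, n + 1, i):
--             sieve[j] = False
--     out = []
--     c = 0
--     for k in range(1, n + 1):
--         if k >= 2 and sieve[k]:
--             c += 1
--         out.append(c)
--     return out
-- ===== Notes on version B (the rewrite author's own statement) =====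
-- stated objective: faster
-- what changed: Replaced per-number trial division (sqrt-bounded loop for every i up to x) by a single Sieve of Eratosthenes marking pass followed by one running prefix-count scan.
import Mathlib
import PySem

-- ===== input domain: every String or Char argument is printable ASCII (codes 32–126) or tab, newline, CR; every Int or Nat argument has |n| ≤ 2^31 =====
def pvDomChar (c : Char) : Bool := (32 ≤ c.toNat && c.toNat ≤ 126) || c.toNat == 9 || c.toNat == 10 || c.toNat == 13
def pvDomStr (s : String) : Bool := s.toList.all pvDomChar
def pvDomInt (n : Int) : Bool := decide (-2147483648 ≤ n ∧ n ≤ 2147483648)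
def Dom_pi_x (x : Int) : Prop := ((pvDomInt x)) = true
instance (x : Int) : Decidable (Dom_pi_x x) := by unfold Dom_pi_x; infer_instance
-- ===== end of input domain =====

-- B replaces A's per-number trial division by one Sieve of Eratosthenes pass plus a running
-- prefix count (objective: faster).

-- ===== PORT A =====
-- int(n**0.5) is ported as Nat.sqrt: exact on the |n| ≤ 2^31 domain (double sqrt is exact there);
-- the early-returning divisor loop is ported as List.all (same tests, same result).
def est_premier (n : Int) : Bool :=
  if n < 2 then false
  else (PySem.List.pyRange 2 ((Nat.sqrt n.toNat : Int) + 1) 1).all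
    (fun i => !(PySem.Int.mod n i == 0))

def pi_x (x : Int) : List Int :=
  ((PySem.List.pyRange 1 (x + 1) 1).foldl
    (fun (st : Int × List Int) i =>
      let c := if est_premier i then st.1 + 1 else st.1
      (c, st.2 ++ [c])) (0, [])).2

-- ===== PORT B =====
-- range(2, n+1) is ported as List.range' 2 (n-1) 1 and range(2*i, n+1, i) as
-- List.range' (2*i) ((n+1-2*i+(i-1))/i) i (Lean ranges are start/count/step; the counts
-- are exactly Python's range lengths).
def pi_x_alt (x : Int) : List Int :=
  let n := (max x 0).toNat
  let sieve := (List.range' 2 (n - 1) 1).foldl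
    (fun s i => (List.range' (2 * i) ((n + 1 - 2 * i + (i - 1)) / i) i).foldl
        (fun l j => l.set j false) s)
    (List.replicate (n + 1) true)
  ((List.range' 1 n 1).foldl
    (fun (st : Int × List Int) k =>
      let c := if decide (2 ≤ k) && sieve.getD k false then st.1 + 1 else st.1
      (c, st.2 ++ [c])) (0, [])).2

-- ===== PRECONDITION & SPEC =====
def Spec_pi_x (x : Int) (out : List Int) : Prop := out = pi_x_alt x
instance (x : Int) (out : List Int) : Decidable (Spec_pi_x x out) := by unfold Spec_pi_x; infer_instance

-- ===== CLAIM (what is proved, stated in full; the proofs are below) =====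
def Claim_equal_pi_x : Prop := ∀ (x : Int), Dom_pi_x x → Spec_pi_x x (pi_x x)

-- ===== LEMMAS AND PROOFS =====

-- Both loops build the same prefix-count list from pointwise-equal boolean tests.
theorem foldl_count_congr {α β : Type} (f : α → Bool) (g : β → Bool) :
    ∀ (l1 : List α) (l2 : List β), l1.map f = l2.map g → ∀ (st : Int × List Int),
      l1.foldl (fun st a =>
        let c := if f a then st.1 + 1 else st.1
        (c, st.2 ++ [c])) st
    = l2.foldl (fun st b =>
        let c := if g b then st.1 + 1 else st.1
        (c, st.2 ++ [c])) st := by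
  intro l1
  induction l1 with
  | nil => intro l2 h st; cases l2 <;> simp_all
  | cons a t ih =>
    intro l2 h st
    cases l2 with
    | nil => simp at h
    | cons b t2 =>
      simp only [List.map_cons, List.cons.injEq] at h
      simp only [List.foldl_cons, h.1]
      exact ih t2 h.2 _

theorem getElem?_foldl_set_false (js : List Nat) :
    ∀ (L : List Bool) (m : Nat),
      (js.foldl (fun l j => l.set j false) L)[m]? =
        if m ∈ js ∧ m < L.length then some false else L[m]? := by
  induction js with
  | nil => intro L m; simp
  | cons j t ih =>
    intro L m
    simp only [List.foldl_cons]
    rw [ih]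
    simp only [List.length_set, List.getElem?_set, List.mem_cons]
    by_cases h1 : m ∈ t <;> by_cases h2 : j = m <;> by_cases h3 : m < L.length <;>
      simp_all [eq_comm]

theorem foldl_foldl_eq_foldl_flatMap {α β γ : Type} (J : β → List α) (g : γ → α → γ) :
    ∀ (outer : List β) (init : γ),
      outer.foldl (fun s i => (J i).foldl g s) init = (outer.flatMap J).foldl g init := by
  intro outer
  induction outer with
  | nil => intro init; rfl
  | cons b t ih => intro init; simp [List.flatMap_cons, List.foldl_append, ih]

-- Membership in the union of the marking ranges ⟺ compositeness (for 2 ≤ m ≤ n).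
theorem marked_iff_not_prime (n m : Nat) (h2 : 2 ≤ m) (hn : m ≤ n) :
    (∃ i ∈ List.range' 2 (n - 1) 1,
        m ∈ List.range' (2 * i) ((n + 1 - 2 * i + (i - 1)) / i) i)
      ↔ ¬ Nat.Prime m := by
  constructor
  · rintro ⟨i, hi, hmem⟩ hp
    rw [List.mem_range'] at hi hmem
    obtain ⟨_, _, hi2⟩ := hi
    obtain ⟨k, _, hk2⟩ := hmem
    have hi2' : 2 ≤ i := by omega
    have hm' : m = i * (2 + k) := by rw [Nat.mul_add]; omega
    have hdvd : i ∣ m := ⟨2 + k, hm'⟩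
    rcases (Nat.Prime.eq_one_or_self_of_dvd hp i hdvd) with h | h
    · omega
    · nlinarith
  · intro hp
    obtain ⟨i, hdvd, hi2, him⟩ := Nat.exists_dvd_of_not_prime2 h2 hp
    obtain ⟨q, hq⟩ := hdvd
    have hq2 : 2 ≤ q := by nlinarith
    have hsplit : i * q = 2 * i + i * (q - 2) := by
      have h : q = 2 + (q - 2) := by omega
      calc i * q = i * (2 + (q - 2)) := by rw [← h]
        _ = i * 2 + i * (q - 2) := Nat.mul_add i 2 (q - 2)
        _ = 2 * i + i * (q - 2) := by omega
    have h2i : 2 * i ≤ n := by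
      have := Nat.mul_le_mul_left i hq2
      omega
    refine ⟨i, ?_, ?_⟩
    · rw [List.mem_range']
      exact ⟨i - 2, by omega, by omega⟩
    · rw [List.mem_range']
      refine ⟨q - 2, ?_, by omega⟩
      have h1 : n + 1 - 2 * i + (i - 1) = (n - 2 * i) + i := by omega
      rw [h1, Nat.add_div_right _ (by omega)]
      have hdiv : q - 2 ≤ (n - 2 * i) / i := by
        rw [Nat.le_div_iff_mul_le (by omega : 0 < i)]
        have : (q - 2) * i = i * (q - 2) := Nat.mul_comm _ _
        omega
      omega

-- A's trial division computes primality.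
theorem est_premier_eq (m : Nat) : est_premier (m : Int) = decide (Nat.Prime m) := by
  unfold est_premier
  by_cases h2 : m < 2
  · have hlt : (m : Int) < 2 := by omega
    have hnp : ¬ Nat.Prime m := fun hp => absurd hp.two_le (by omega)
    simp [hlt, hnp]
  · have hlt : ¬ (m : Int) < 2 := by omega
    have htn : (m : Int).toNat = m := by omega
    rw [if_neg hlt, htn]
    apply Bool.eq_iff_iff.mpr
    rw [List.all_eq_true, decide_eq_true_eq]
    constructor
    · intro h
      rw [Nat.prime_def_le_sqrt]
      refine ⟨by omega, fun d hd2 hdsq hdvd => ?_⟩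
      have hmem : (d : Int) ∈ PySem.List.pyRange 2 ((Nat.sqrt m : Int) + 1) 1 := by
        rw [PySem.List.mem_pyRange_one]
        constructor <;> [exact_mod_cast hd2; exact_mod_cast Nat.lt_succ_of_le hdsq]
      have := h _ hmem
      simp only [Bool.not_eq_eq_eq_not, Bool.not_true, beq_eq_false_iff_ne, ne_eq] at this
      exact this ((PySem.Int.mod_eq_zero_iff_dvd _ _).mpr (Int.natCast_dvd_natCast.mpr hdvd))
    · intro hp i hi
      rw [PySem.List.mem_pyRange_one] at hi
      have hi0 : 0 ≤ i := by omega
      simp only [Bool.not_eq_eq_eq_not, Bool.not_true, beq_eq_false_iff_ne, ne_eq]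
      rw [PySem.Int.mod_eq_zero_iff_dvd]
      intro hdvd
      have hd2 : 2 ≤ i.toNat := by omega
      have hdsq : i.toNat ≤ Nat.sqrt m := by omega
      have hdvd' : i.toNat ∣ m := by
        rwa [← Int.natCast_dvd_natCast, Int.toNat_of_nonneg hi0]
      exact (Nat.prime_def_le_sqrt.mp hp).2 i.toNat hd2 hdsq hdvd'

-- B's sieve lookup, characterised by the marking ranges (for m ≤ n).
theorem sieve_getD (n m : Nat) (hm : m ≤ n) :
    (((List.range' 2 (n - 1) 1).foldl
        (fun s i => (List.range' (2 * i) ((n + 1 - 2 * i + (i - 1)) / i) i).foldl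
            (fun l j => l.set j false) s)
        (List.replicate (n + 1) true)).getD m false)
      = !decide (∃ i ∈ List.range' 2 (n - 1) 1,
          m ∈ List.range' (2 * i) ((n + 1 - 2 * i + (i - 1)) / i) i) := by
  rw [foldl_foldl_eq_foldl_flatMap]
  rw [List.getD_eq_getElem?_getD, getElem?_foldl_set_false]
  have hlen : m < (List.replicate (n + 1) true).length := by simp; omega
  by_cases hmem : m ∈ (List.range' 2 (n - 1) 1).flatMap
      (fun i => List.range' (2 * i) ((n + 1 - 2 * i + (i - 1)) / i) i)
  · have hex : ∃ i ∈ List.range' 2 (n - 1) 1,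
        m ∈ List.range' (2 * i) ((n + 1 - 2 * i + (i - 1)) / i) i := by
      simpa [List.mem_flatMap] using hmem
    rw [if_pos ⟨hmem, hlen⟩, decide_eq_true hex]
    rfl
  · have hex : ¬ ∃ i ∈ List.range' 2 (n - 1) 1,
        m ∈ List.range' (2 * i) ((n + 1 - 2 * i + (i - 1)) / i) i := by
      simpa [List.mem_flatMap] using hmem
    rw [if_neg (fun h => hmem h.1), decide_eq_false hex]
    simp [show m < n + 1 by omega]

-- The pointwise equality of the two boolean tests over the shared index range.
theorem map_tests_eq (x : Int) :
    (PySem.List.pyRange 1 (x + 1) 1).map est_premier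
      = (List.range' 1 ((max x 0).toNat) 1).map
          (fun k => decide (2 ≤ k) &&
            (((List.range' 2 ((max x 0).toNat - 1) 1).foldl
              (fun s i => (List.range' (2 * i) (((max x 0).toNat + 1 - 2 * i + (i - 1)) / i) i).foldl
                  (fun l j => l.set j false) s)
              (List.replicate ((max x 0).toNat + 1) true)).getD k false)) := by
  set n := (max x 0).toNat with hn
  have hnx : (n : Int) = max x 0 := by omega
  apply List.ext_getElem
  · simp [PySem.List.length_pyRange_one]
    omega
  · intro i h1 h2
    have hin : i < n := by simpa using h2
    simp only [List.getElem_map, PySem.List.getElem_pyRange_one, List.getElem_range']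
    have hcast : (1 : Int) + (i : Int) = ((1 + i : Nat) : Int) := by push_cast; ring
    rw [hcast, est_premier_eq]
    by_cases hi0 : i = 0
    · subst hi0
      simp [Nat.not_prime_one]
    · have h2m : 2 ≤ 1 + 1 * i := by omega
      have hmn : 1 + 1 * i ≤ n := by omega
      rw [sieve_getD n (1 + 1 * i) hmn,
        decide_eq_decide.mpr (marked_iff_not_prime n (1 + 1 * i) h2m hmn)]
      simp [h2m, show (1 + i : Nat) = 1 + 1 * i by omega]
      exact inferInstance

-- ===== VERDICT (by name: the statement is the Claim_ definition above) =====
theorem pi_x_spec : Claim_equal_pi_x := by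
  intro x _
  show pi_x x = pi_x_alt x
  unfold pi_x pi_x_alt
  exact congrArg Prod.snd (foldl_count_congr _ _ _ _ (map_tests_eq x) (0, []))
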